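-- pv_equiv track=rewrite | github.com/ponir-techlogicians/lovecompatability | app/utils.py | adjacency_sum_steps_fixed
-- ===== SOURCE A (Python) =====
-- def adjacency_sum_steps_fixed(arr: list, total_steps: int = 5) -> list:
--     """Return a fixed number of adjacency sum steps (default 5).
--     If the result reaches two digits early, repeat the last step."""
--     steps = [arr[:]]  # Start with the initial array
--
--     while len(steps) < total_steps:
--         if len(arr) <= 2:
--             # Repeat the last step if already reduced
--             steps.append(arr[:])
--         else:
--             arr = [(arr[i] + arr[i + 1]) % 10 for i in range(len(arr) - 1)]
--             steps.append(arr[:])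
--     return steps
-- ===== SOURCE B (Python) =====
-- def adjacency_sum_steps_fixed(arr: list, total_steps: int = 5) -> list:
--     """Closed-form rewrite: step s is the binomial convolution of the original
--     array, row s[i] = sum(C(s,j)*arr[i+j]) % 10, using a Pascal row kept mod 10;
--     the remaining slots are padded with copies of the last computed row."""
--     n = len(arr)
--     r = min(max(n - 2, 0), max(total_steps - 1, 0))
--     coeffs = [1]  # Pascal row C(s, j) mod 10
--     steps = [list(arr)]
--     for s in range(1, r + 1):
--         coeffs = [((coeffs[j - 1] if j > 0 else 0) +
--                    (coeffs[j] if j < s else 0)) % 10 for j in range(s + 1)]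
--         steps.append([sum(c * v for c, v in zip(coeffs, arr[i:])) % 10
--                      for i in range(n - s)])
--     steps += [list(steps[-1]) for _ in range(total_steps - len(steps))]
--     return steps
-- ===== Notes on version B (the rewrite author's own statement) =====
-- stated objective: alternative
-- what changed: A iterates the pairwise (a+b)%10 reduction step by step; B instead computes each step directly from the ORIGINAL array as a binomial convolution (row s[i] = sum(C(s,j)*arr[i+j]) % 10, Pascal row kept mod 10) and then pads with copies of the last genuine row.
import Mathlib
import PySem

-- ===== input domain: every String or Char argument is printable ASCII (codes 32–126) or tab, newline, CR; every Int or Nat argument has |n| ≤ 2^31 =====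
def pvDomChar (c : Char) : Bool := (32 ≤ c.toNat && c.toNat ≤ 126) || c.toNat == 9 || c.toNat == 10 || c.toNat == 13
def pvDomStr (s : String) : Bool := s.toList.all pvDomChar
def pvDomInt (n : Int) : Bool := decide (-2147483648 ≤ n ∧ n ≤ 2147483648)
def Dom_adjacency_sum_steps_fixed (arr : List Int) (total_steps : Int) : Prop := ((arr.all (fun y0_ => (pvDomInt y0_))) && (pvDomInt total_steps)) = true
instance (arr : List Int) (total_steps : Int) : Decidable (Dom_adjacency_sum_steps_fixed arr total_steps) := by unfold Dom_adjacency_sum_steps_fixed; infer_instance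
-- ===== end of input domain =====

-- B replaces A's iterated pairwise reduction by a closed-form computation: step s is the
-- binomial convolution of the ORIGINAL array (Pascal-row coefficients kept mod 10), and the
-- remaining slots are padded with copies of the last computed row (alternative).

-- ===== PORT A =====
-- arr = [(arr[i] + arr[i + 1]) % 10 for i in range(len(arr) - 1)]
def pvAReduce (arr : List Int) : List Int :=
  (PySem.List.pyRange 0 ((arr.length : Int) - 1) 1).map
    (fun i => PySem.Int.mod (PySem.List.pyGetD arr i 0 + PySem.List.pyGetD arr (i + 1) 0) 10)

-- while len(steps) < total_steps: … — each iteration appends exactly one entry, so the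
-- loop runs exactly (total_steps - len(steps)).toNat times; that count is the fuel
def pvALoop (fuel : Nat) (arr : List Int) (steps : List (List Int)) : List (List Int) :=
  match fuel with
  | 0 => steps
  | k + 1 =>
    if arr.length ≤ 2 then
      pvALoop k arr (steps ++ [arr])
    else
      let arr' := pvAReduce arr
      pvALoop k arr' (steps ++ [arr'])

def adjacency_sum_steps_fixed (arr : List Int) (total_steps : Int) : List (List Int) :=
  pvALoop (total_steps - 1).toNat arr [arr]

-- ===== PORT B =====
-- coeffs = [((coeffs[j-1] if j > 0 else 0) + (coeffs[j] if j < s else 0)) % 10 for j in range(s+1)]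
-- (coeffs[j-1] / coeffs[j] are always in range under their guards; List.getD is exact there)
def pvBNextCoeffs (cs : List Int) (s : Nat) : List Int :=
  (List.range (s + 1)).map (fun j =>
    PySem.Int.mod ((if 0 < j then cs.getD (j - 1) 0 else 0) +
                   (if j < s then cs.getD j 0 else 0)) 10)

-- [sum(c * v for c, v in zip(coeffs, arr[i:])) % 10 for i in range(n - s)]
def pvBRow (cs : List Int) (arr : List Int) (n s : Nat) : List Int :=
  (List.range (n - s)).map (fun (i : Nat) =>
    PySem.Int.mod (((cs.zip (PySem.List.slice arr (some ((i : Nat) : Int)) none)).map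
      (fun p => p.1 * p.2)).sum) 10)

-- for s in range(1, r + 1): …  (k counts the remaining iterations, s the step number)
def pvBGo (arr : List Int) (n : Nat) : Nat → Nat → List Int → List (List Int) → List (List Int)
  | 0, _, _, steps => steps
  | k + 1, s, cs, steps =>
      let cs' := pvBNextCoeffs cs s
      pvBGo arr n k (s + 1) cs' (steps ++ [pvBRow cs' arr n s])

def adjacency_sum_steps_fixed_alt (arr : List Int) (total_steps : Int) : List (List Int) :=
  let n := arr.length
  let r := (min (max ((n : Int) - 2) 0) (max (total_steps - 1) 0)).toNat
  let steps := pvBGo arr n r 1 [1] [arr]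
  steps ++ List.replicate (total_steps - (steps.length : Int)).toNat
    (PySem.List.pyGetD steps (-1) [])

-- ===== PRECONDITION & SPEC =====
def Spec_adjacency_sum_steps_fixed (arr : List Int) (total_steps : Int) (out : List (List Int)) : Prop := out = adjacency_sum_steps_fixed_alt arr total_steps
instance (arr : List Int) (total_steps : Int) (out : List (List Int)) : Decidable (Spec_adjacency_sum_steps_fixed arr total_steps out) := by unfold Spec_adjacency_sum_steps_fixed; infer_instance

-- ===== CLAIM (what is proved, stated in full; the proofs are below) =====
def Claim_equal_adjacency_sum_steps_fixed : Prop := ∀ (arr : List Int) (total_steps : Int), Dom_adjacency_sum_steps_fixed arr total_steps → Spec_adjacency_sum_steps_fixed arr total_steps (adjacency_sum_steps_fixed arr total_steps)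

-- ===== LEMMAS AND PROOFS =====

-- the Pascal row of step s, as B maintains it (coefficients mod 10)
def pvCoeffIter : Nat → List Int
  | 0 => [1]
  | s + 1 => pvBNextCoeffs (pvCoeffIter s) (s + 1)

-- the s-th step array (s = 0: the input itself; s ≥ 1: B's convolution row)
def pvRows (arr : List Int) (s : Nat) : List Int :=
  if s = 0 then arr else pvBRow (pvCoeffIter s) arr arr.length s

-- the exact (un-modded) convolution of a coefficient list with arr at offset i
def pvDot (cs arr : List Int) (i : Nat) : Int :=
  ∑ j ∈ Finset.range cs.length, cs.getD j 0 * arr.getD (i + j) 0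

theorem pvCoeffIter_length (s : Nat) : (pvCoeffIter s).length = s + 1 := by
  cases s with
  | zero => rfl
  | succ k => simp [pvCoeffIter, pvBNextCoeffs]

theorem pvZipSum (cs : List Int) : ∀ (l : List Int), cs.length ≤ l.length →
    ((cs.zip l).map (fun p => p.1 * p.2)).sum
      = ∑ j ∈ Finset.range cs.length, cs.getD j 0 * l.getD j 0 := by
  induction cs with
  | nil => intro l h; simp
  | cons c cs ih =>
    intro l h
    cases l with
    | nil => simp at h
    | cons x l =>
      simp only [List.zip_cons_cons, List.map_cons, List.sum_cons, List.length_cons]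
      rw [Finset.sum_range_succ']
      simp only [List.getD_cons_succ, List.getD_cons_zero]
      rw [ih l (by simpa using h)]
      ring

theorem pvZipSum_drop (cs arr : List Int) (i : Nat) (h : cs.length + i ≤ arr.length) :
    ((cs.zip (arr.drop i)).map (fun p => p.1 * p.2)).sum = pvDot cs arr i := by
  rw [pvZipSum cs (arr.drop i) (by simp; omega)]
  unfold pvDot
  apply Finset.sum_congr rfl
  intro j hj
  congr 1
  simp only [List.getD_eq_getElem?_getD, List.getElem?_drop]

-- key Pascal step: the next row's convolution is congruent (mod 10) to the sum of two shifts
theorem pvKey (s : Nat) (cs arr : List Int) (i : Nat) (hl : cs.length = s + 1) :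
    pvDot (pvBNextCoeffs cs (s + 1)) arr i % 10
      = (pvDot cs arr i + pvDot cs arr (i + 1)) % 10 := by
  have hlen : (pvBNextCoeffs cs (s + 1)).length = s + 2 := by simp [pvBNextCoeffs]
  have hget : ∀ j, j < s + 2 → (pvBNextCoeffs cs (s + 1)).getD j 0
      = (((if 0 < j then cs.getD (j - 1) 0 else 0) +
          (if j < s + 1 then cs.getD j 0 else 0)) % 10) := by
    intro j hj
    rw [List.getD_eq_getElem _ _ (by omega)]
    simp [pvBNextCoeffs, PySem.Int.mod_eq_emod_of_pos]
  unfold pvDot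
  rw [hlen, hl]
  rw [Finset.sum_int_mod]
  rw [Finset.sum_congr rfl (fun j hj => by
    rw [hget j (Finset.mem_range.mp hj), Int.mul_emod, Int.emod_emod_of_dvd _ (dvd_refl 10),
        ← Int.mul_emod])]
  rw [← Finset.sum_int_mod]
  congr 1
  have hsplit : ∑ j ∈ Finset.range (s + 2),
      ((if 0 < j then cs.getD (j - 1) 0 else 0) + (if j < s + 1 then cs.getD j 0 else 0)) * arr.getD (i + j) 0
    = (∑ j ∈ Finset.range (s + 2), (if 0 < j then cs.getD (j - 1) 0 else 0) * arr.getD (i + j) 0)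
      + ∑ j ∈ Finset.range (s + 2), (if j < s + 1 then cs.getD j 0 else 0) * arr.getD (i + j) 0 := by
    rw [← Finset.sum_add_distrib]
    exact Finset.sum_congr rfl (fun j _ => by ring)
  rw [hsplit]
  have h1 : ∑ j ∈ Finset.range (s + 2), (if 0 < j then cs.getD (j - 1) 0 else 0) * arr.getD (i + j) 0
      = ∑ j ∈ Finset.range (s + 1), cs.getD j 0 * arr.getD (i + 1 + j) 0 := by
    rw [Finset.sum_range_succ']
    simp only [Nat.zero_lt_succ, if_pos, Nat.add_sub_cancel, if_false,
      zero_mul, add_zero, lt_self_iff_false]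
    exact Finset.sum_congr rfl (fun j _ => by rw [show i + (j + 1) = i + 1 + j by omega])
  have h2 : ∑ j ∈ Finset.range (s + 2), (if j < s + 1 then cs.getD j 0 else 0) * arr.getD (i + j) 0
      = ∑ j ∈ Finset.range (s + 1), cs.getD j 0 * arr.getD (i + j) 0 := by
    rw [Finset.sum_range_succ]
    simp only [if_false, zero_mul, add_zero, lt_self_iff_false]
    exact Finset.sum_congr rfl (fun j hj => by
      rw [if_pos (Finset.mem_range.mp hj)])
  rw [h1, h2]; ring

theorem pvRows_length (arr : List Int) (s : Nat) :
    (pvRows arr s).length = arr.length - s := by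
  cases s with
  | zero => simp [pvRows]
  | succ k => simp [pvRows, pvBRow]

theorem pvBRow_getD (cs arr : List Int) (n s i : Nat) (hi : i < n - s)
    (hlen : cs.length + i ≤ arr.length) :
    (pvBRow cs arr n s).getD i 0 = pvDot cs arr i % 10 := by
  unfold pvBRow
  rw [List.getD_eq_getElem _ _ (by simpa using hi)]
  rw [List.getElem_map, List.getElem_range]
  rw [PySem.List.slice_from_natCast, pvZipSum_drop cs arr i hlen,
    PySem.Int.mod_eq_emod_of_pos (by norm_num)]

theorem pvRows_elem (arr : List Int) (s i : Nat) (hi : i < arr.length - s) :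
    (pvRows arr s).getD i 0 % 10 = pvDot (pvCoeffIter s) arr i % 10 := by
  cases s with
  | zero =>
    simp [pvRows, pvCoeffIter, pvDot]
  | succ k =>
    unfold pvRows
    rw [if_neg (Nat.succ_ne_zero k),
      pvBRow_getD _ _ _ _ _ hi (by rw [pvCoeffIter_length]; omega),
      Int.emod_emod_of_dvd _ (dvd_refl 10)]

theorem pvReduce_rows (arr : List Int) (s : Nat) (h : s + 3 ≤ arr.length) :
    pvAReduce (pvRows arr s) = pvRows arr (s + 1) := by
  have hlen : (pvRows arr s).length = arr.length - s := pvRows_length arr s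
  unfold pvAReduce
  conv_rhs => rw [pvRows, if_neg (Nat.succ_ne_zero s)]
  unfold pvBRow
  apply List.ext_getElem
  · simp [hlen, PySem.List.length_pyRange_one]; omega
  · intro k h1 h2
    have hk : k < arr.length - (s + 1) := by simpa using h2
    rw [List.getElem_map, List.getElem_map, PySem.List.getElem_pyRange_one, List.getElem_range]
    have e0 : (0 : Int) + (k : Nat) = ((k : Nat) : Int) := by omega
    rw [e0]
    have e1 : ((k : Nat) : Int) + 1 = (((k + 1 : Nat)) : Int) := by push_cast; omega
    rw [e1, PySem.List.pyGetD_natCast, PySem.List.pyGetD_natCast]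
    rw [PySem.Int.mod_eq_emod_of_pos (by norm_num), PySem.Int.mod_eq_emod_of_pos (by norm_num)]
    rw [PySem.List.slice_from_natCast,
      pvZipSum_drop _ arr k (by rw [pvCoeffIter_length]; omega)]
    rw [Int.add_emod]
    rw [pvRows_elem arr s k (by omega), pvRows_elem arr s (k + 1) (by omega)]
    rw [← Int.add_emod]
    have := pvKey s (pvCoeffIter s) arr k (pvCoeffIter_length s)
    rw [show pvCoeffIter (s + 1) = pvBNextCoeffs (pvCoeffIter s) (s + 1) from rfl, this]

-- once reduced to length ≤ 2, A's loop only appends copies of arr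
theorem pvALoop_small (arr : List Int) (h : arr.length ≤ 2) :
    ∀ (n : Nat) (steps : List (List Int)),
      pvALoop n arr steps = steps ++ List.replicate n arr := by
  intro n
  induction n with
  | zero => intro steps; simp [pvALoop]
  | succ k ih =>
    intro steps
    rw [pvALoop]
    simp only [h, if_pos]
    rw [ih (steps ++ [arr])]
    simp [List.replicate_succ]

theorem pvALoop_unroll (arr : List Int) (hn : 3 ≤ arr.length) :
    ∀ (m s : Nat) (steps : List (List Int)), s ≤ arr.length - 2 →
      pvALoop m (pvRows arr s) steps
        = steps ++ (List.range (min m (arr.length - 2 - s))).map (fun j => pvRows arr (s + 1 + j))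
            ++ List.replicate (m - (arr.length - 2 - s)) (pvRows arr (s + min m (arr.length - 2 - s))) := by
  intro m
  induction m with
  | zero =>
    intro s steps hs
    simp [pvALoop]
  | succ k ih =>
    intro s steps hs
    by_cases hend : s = arr.length - 2
    · have hlen2 : (pvRows arr s).length ≤ 2 := by rw [pvRows_length]; omega
      rw [pvALoop_small _ hlen2 (k + 1) steps]
      have e : arr.length - 2 - s = 0 := by omega
      simp [e]
    · have hslt : s < arr.length - 2 := by omega
      have hlen3 : ¬ ((pvRows arr s).length ≤ 2) := by rw [pvRows_length]; omega
      rw [pvALoop]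
      rw [if_neg hlen3]
      rw [pvReduce_rows arr s (by omega)]
      rw [ih (s + 1) (steps ++ [pvRows arr (s + 1)]) (by omega)]
      have hd : min (k + 1) (arr.length - 2 - s) = min k (arr.length - 2 - (s + 1)) + 1 := by omega
      rw [hd, List.range_succ_eq_map, List.map_cons, List.map_map]
      simp only [List.append_assoc, List.cons_append]
      congr 1
      congr 1
      rw [List.nil_append]
      congr 1
      · exact List.map_congr_left (fun j _ => by
          simp only [Function.comp_apply]; congr 1; omega)
      · congr 1
        · omega
        · congr 1; omega

theorem pvBGo_unroll (arr : List Int) :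
    ∀ (k s : Nat) (steps : List (List Int)),
      pvBGo arr arr.length k (s + 1) (pvCoeffIter s) steps
        = steps ++ (List.range k).map (fun j => pvRows arr (s + 1 + j)) := by
  intro k
  induction k with
  | zero => intro s steps; simp [pvBGo]
  | succ k ih =>
    intro s steps
    rw [pvBGo]
    have hc : pvBNextCoeffs (pvCoeffIter s) (s + 1) = pvCoeffIter (s + 1) := rfl
    rw [hc, ih (s + 1)]
    rw [List.range_succ_eq_map, List.map_cons, List.map_map,
      List.append_assoc, List.singleton_append]
    congr 1
    congr 1
    exact List.map_congr_left (fun j _ => by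
      simp only [Function.comp_apply]; congr 1; omega)

theorem pvMain (arr : List Int) (t : Int) :
    adjacency_sum_steps_fixed arr t = adjacency_sum_steps_fixed_alt arr t := by
  simp only [adjacency_sum_steps_fixed, adjacency_sum_steps_fixed_alt]
  set n := arr.length with hn
  set r := (min (max ((n : Int) - 2) 0) (max (t - 1) 0)).toNat with hr
  have hB : pvBGo arr n r 1 [1] [arr]
      = [arr] ++ (List.range r).map (fun j => pvRows arr (0 + 1 + j)) := by
    simpa [pvCoeffIter] using pvBGo_unroll arr r 0 [arr]
  rw [hB]
  by_cases hsmall : n ≤ 2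
  · have hr0 : r = 0 := by omega
    rw [hr0]
    simp only [List.range_zero, List.map_nil, List.append_nil]
    rw [pvALoop_small arr (by omega) (t - 1).toNat [arr]]
    rw [show PySem.List.pyGetD [arr] (-1) ([] : List Int) = arr from rfl]
    norm_num
  · have hn3 : 3 ≤ n := by omega
    have hA := pvALoop_unroll arr hn3 (t - 1).toNat 0 [arr] (by omega)
    have hrow0 : pvRows arr 0 = arr := rfl
    rw [hrow0] at hA
    rw [hA]
    have hd : min (t - 1).toNat (n - 2 - 0) = r := by omega
    have hlen : (([arr] : List (List Int)) ++ (List.range r).map (fun j => pvRows arr (0 + 1 + j))).length = r + 1 := by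
      simp
    rw [hd, hlen]
    congr 1
    congr 1
    · omega
    · cases hrc : r with
      | zero => rfl
      | succ k =>
        rw [List.range_succ, List.map_append, List.map_singleton,
          ← List.append_assoc, PySem.List.pyGetD_neg_one_append_singleton]
        congr 1
        omega

-- ===== VERDICT (by name: the statement is the Claim_ definition above) =====
theorem adjacency_sum_steps_fixed_spec : Claim_equal_adjacency_sum_steps_fixed := by
  intro arr t _
  unfold Spec_adjacency_sum_steps_fixed
  exact pvMain arr t
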